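-- pv_equiv track=rewrite | github.com/android2600/Leetcode-Problems | 2. Multiple left rotations of Array.py | solve
-- ===== SOURCE A (Python) =====
-- def solve(A, B):
--     result=[]
--     for i in range (0,len(B)):
--         k=B[i]%len(A)
--         C=[a for a in A]
--
--         for i in range(0,int(len(A)/2)):
--             C[i]=A[len(A)-i-1]
--             C[len(A)-i-1]=A[i]
--
--         for i in range(0,int((len(A)-k)/2)):
--             temp=C[i]
--             C[i]=C[len(A)-k-i-1]
--             C[len(A)-k-i-1]=temp
--         num=0
--         for i in range(len(A)-1,len(A)-int((k)/2+1),-1):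
--             temp=C[i]
--             C[i]=C[len(A)-k+num]
--             C[len(A)-k+num]=temp
--             num+=1
--         result.append(C)
--     return result
-- ===== SOURCE B (Python) =====
-- def solve(A, B):
--     result = []
--     for b in B:
--         k = b % len(A)
--         result.append(A[k:] + A[:k])
--     return result
-- ===== Notes on version B (the rewrite author's own statement) =====
-- stated objective: simpler
-- what changed: Replaces the three in-place index-swapping reversal passes per query with a single slice concatenation A[k:] + A[:k] where k = B[i] % len(A).
import Mathlib
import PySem

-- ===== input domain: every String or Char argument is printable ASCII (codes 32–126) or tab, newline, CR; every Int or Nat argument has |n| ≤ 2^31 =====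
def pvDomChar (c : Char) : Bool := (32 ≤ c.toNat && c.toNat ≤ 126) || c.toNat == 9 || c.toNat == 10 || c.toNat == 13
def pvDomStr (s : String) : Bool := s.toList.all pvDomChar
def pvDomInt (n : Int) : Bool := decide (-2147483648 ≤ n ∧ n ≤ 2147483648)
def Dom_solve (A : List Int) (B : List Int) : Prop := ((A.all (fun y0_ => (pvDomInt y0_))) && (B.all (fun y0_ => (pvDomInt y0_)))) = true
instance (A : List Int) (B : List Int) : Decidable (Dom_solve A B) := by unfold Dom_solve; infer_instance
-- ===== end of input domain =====

-- B replaces A's three index-swapping reversal passes per query with one slice concatenation A[k:] + A[:k]; same cost, much simpler.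


-- ===== PORT A =====
-- Transliteration notes: all list indices in A are nonnegative and in range during every run
-- admitted by Pre_solve, so Python's C[i]=… / C[i] are List.set / List.getD on Nat indices;
-- int(x/2) on a nonnegative int x is x / 2 (Nat division); the third loop iterates
-- i = len(A)-1 down to len(A)-int(k/2+1)+1 while incrementing num from 0, i.e. it runs
-- ⌊k/2⌋ times with i = len(A)-1-num — it is ported as a fold over num with i computed from num.
def solve (A : List Int) (B : List Int) : List (List Int) :=
  let n := A.length
  (List.range B.length).foldl (fun result i =>
    -- k = B[i] % len(A); under Pre_solve len(A) > 0 here, so the mod is Python-exact and nonnegative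
    let k : Nat := (PySem.Int.mod (B.getD i 0) (n : Int)).toNat
    -- C = [a for a in A]
    let C := A.map (fun a => a)
    -- first loop: C[i] = A[len(A)-i-1]; C[len(A)-i-1] = A[i]
    let C := (List.range (n / 2)).foldl (fun C i =>
        (C.set i (A.getD (n - i - 1) 0)).set (n - i - 1) (A.getD i 0)) C
    -- second loop: temp = C[i]; C[i] = C[len(A)-k-i-1]; C[len(A)-k-i-1] = temp
    let C := (List.range ((n - k) / 2)).foldl (fun C i =>
        let temp := C.getD i 0
        (C.set i (C.getD (n - k - i - 1) 0)).set (n - k - i - 1) temp) C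
    -- third loop, over num = 0 .. k/2-1 with i = len(A)-1-num:
    -- temp = C[i]; C[i] = C[len(A)-k+num]; C[len(A)-k+num] = temp
    let C := (List.range (k / 2)).foldl (fun C num =>
        let i := n - 1 - num
        let temp := C.getD i 0
        (C.set i (C.getD (n - k + num) 0)).set (n - k + num) temp) C
    result ++ [C]) []

-- ===== PORT B =====
-- result.append(A[k:] + A[:k]); k = b % len(A) is nonnegative whenever it is defined (len(A) > 0),
-- so the slices A[k:] / A[:k] are exactly List.drop k / List.take k.
def solve_alt (A : List Int) (B : List Int) : List (List Int) :=
  B.foldl (fun result b =>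
    let k : Nat := (PySem.Int.mod b (A.length : Int)).toNat
    result ++ [A.drop k ++ A.take k]) []

-- ===== PRECONDITION & SPEC =====
-- Pre_solve excludes exactly the inputs where Python A raises ZeroDivisionError
-- (B[i] % len(A) with A empty and B nonempty); B raises there too.
def Pre_solve (A : List Int) (B : List Int) : Prop := A ≠ [] ∨ B = []
instance (A : List Int) (B : List Int) : Decidable (Pre_solve A B) := by unfold Pre_solve; infer_instance
def pvWitness_solve : List Int × List Int := ([1, 2, 3, 4], [0, 1, 5, -2])

def Spec_solve (A : List Int) (B : List Int) (out : List (List Int)) : Prop := out = solve_alt A B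
instance (A : List Int) (B : List Int) (out : List (List Int)) : Decidable (Spec_solve A B out) := by unfold Spec_solve; infer_instance

-- ===== CLAIM (what is proved, stated in full; the proofs are below) =====
def Claim_equal_solve : Prop := ∀ (A : List Int) (B : List Int), Dom_solve A B → Pre_solve A B → Spec_solve A B (solve A B)

-- ===== LEMMAS AND PROOFS =====

def pvSwap (C : List Int) (p q : Nat) : List Int :=
  (C.set p (C.getD q 0)).set q (C.getD p 0)

theorem pvSwap_length (C : List Int) (p q : Nat) : (pvSwap C p q).length = C.length := by
  simp [pvSwap]

theorem pvSwap_getD (C : List Int) (p q j : Nat) (hp : p < C.length) (hq : q < C.length) :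
    (pvSwap C p q).getD j 0 =
      if j = q then C.getD p 0 else if j = p then C.getD q 0 else C.getD j 0 := by
  unfold pvSwap
  simp only [List.getD_eq_getElem?_getD, List.getElem?_set, List.length_set]
  split_ifs <;> first | rfl | omega

theorem swapFold_length (C : List Int) (m : Nat) (f g : Nat → Nat) :
    ((List.range m).foldl (fun D i => pvSwap D (f i) (g i)) C).length = C.length := by
  induction m generalizing C with
  | zero => simp
  | succ m ih =>
    rw [List.range_succ, List.foldl_append]
    simp only [List.foldl_cons, List.foldl_nil]
    rw [pvSwap_length, ih]

theorem swapFold_getD (C : List Int) (lo len m : Nat) (h : lo + len ≤ C.length)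
    (hm : m ≤ len / 2) (j : Nat) :
    ((List.range m).foldl (fun D i => pvSwap D (lo + i) (lo + len - 1 - i)) C).getD j 0 =
      if (lo ≤ j ∧ j < lo + m) ∨ (lo + len - m ≤ j ∧ j < lo + len) then
        C.getD (2 * lo + len - 1 - j) 0
      else C.getD j 0 := by
  induction m generalizing j with
  | zero =>
    simp only [List.range_zero, List.foldl_nil]
    rw [if_neg (by omega)]
  | succ m ih =>
    have hm' : m ≤ len / 2 := by omega
    rw [List.range_succ, List.foldl_append]
    simp only [List.foldl_cons, List.foldl_nil]
    have hlen : ((List.range m).foldl (fun D i => pvSwap D (lo + i) (lo + len - 1 - i)) C).length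
        = C.length := swapFold_length C m _ _
    rw [pvSwap_getD _ _ _ _ (by omega) (by omega)]
    simp only [ih hm']
    split_ifs <;> first | rfl | omega | (congr 1; omega)

theorem setset_getD (C : List Int) (p q j : Nat) (a b : Int) :
    ((C.set p a).set q b).getD j 0 =
      if j = q ∧ q < C.length then b else if j = p ∧ p < C.length then a else C.getD j 0 := by
  simp only [List.getD_eq_getElem?_getD, List.getElem?_set, List.length_set]
  split_ifs <;> first | rfl | omega | simp_all

theorem setFold_length (C0 : List Int) (m : Nat) (f g : Nat → Nat) (a b : Nat → Int) :
    ((List.range m).foldl (fun C i => (C.set (f i) (a i)).set (g i) (b i)) C0).length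
      = C0.length := by
  induction m with
  | zero => simp
  | succ m ih =>
    rw [List.range_succ, List.foldl_append]
    simp only [List.foldl_cons, List.foldl_nil]
    rw [List.length_set, List.length_set, ih]

theorem loop1_getD (A : List Int) (m j : Nat) (hm : m ≤ A.length / 2) :
    ((List.range m).foldl
        (fun C i => (C.set i (A.getD (A.length - i - 1) 0)).set (A.length - i - 1) (A.getD i 0))
        (A.map (fun a => a))).getD j 0 =
      if j < m ∨ (A.length - m ≤ j ∧ j < A.length) then A.getD (A.length - 1 - j) 0
      else A.getD j 0 := by
  induction m generalizing j with
  | zero =>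
    simp only [List.range_zero, List.foldl_nil, List.map_id']
    rw [if_neg (by omega)]
  | succ m ih =>
    have hm' : m ≤ A.length / 2 := by omega
    rw [List.range_succ, List.foldl_append]
    simp only [List.foldl_cons, List.foldl_nil]
    have hlen : ((List.range m).foldl
        (fun C i => (C.set i (A.getD (A.length - i - 1) 0)).set (A.length - i - 1) (A.getD i 0))
        (A.map (fun a => a))).length = A.length := by
      rw [setFold_length, List.length_map]
    rw [setset_getD, hlen]
    simp only [fun j => ih j hm']
    split_ifs <;> first | rfl | omega | (congr 1; omega)

theorem pvSwap_comm (C : List Int) (p q : Nat) (h : p ≠ q) : pvSwap C p q = pvSwap C q p := by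
  unfold pvSwap
  exact List.set_comm _ _ h

theorem rot_getD (A : List Int) (k j : Nat) (hk : k ≤ A.length) (hj : j < A.length) :
    (A.drop k ++ A.take k).getD j 0 =
      if j < A.length - k then A.getD (k + j) 0 else A.getD (j - (A.length - k)) 0 := by
  simp only [List.getD_eq_getElem?_getD, List.getElem?_append, List.length_drop,
    List.getElem?_drop, List.getElem?_take]
  split_ifs <;> first | rfl | omega

theorem ext_getD (l1 l2 : List Int) (hl : l1.length = l2.length)
    (h : ∀ j, j < l1.length → l1.getD j 0 = l2.getD j 0) : l1 = l2 := by
  apply List.ext_getElem hl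
  intro i h1 h2
  have hi := h i h1
  rwa [List.getD_eq_getElem _ _ h1, List.getD_eq_getElem _ _ h2] at hi

theorem query_eq (A : List Int) (k : Nat) (hk : k < A.length) :
    (List.range (k / 2)).foldl
      (fun C num =>
        (C.set (A.length - 1 - num) (C.getD (A.length - k + num) 0)).set (A.length - k + num)
          (C.getD (A.length - 1 - num) 0))
      ((List.range ((A.length - k) / 2)).foldl
        (fun C i =>
          (C.set i (C.getD (A.length - k - i - 1) 0)).set (A.length - k - i - 1) (C.getD i 0))
        ((List.range (A.length / 2)).foldl
          (fun C i => (C.set i (A.getD (A.length - i - 1) 0)).set (A.length - i - 1) (A.getD i 0))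
          (A.map (fun a => a))))
    = A.drop k ++ A.take k := by
  have e2 : ∀ (C : List Int),
      (List.range ((A.length - k) / 2)).foldl
        (fun C i =>
          (C.set i (C.getD (A.length - k - i - 1) 0)).set (A.length - k - i - 1) (C.getD i 0)) C
      = (List.range ((A.length - k) / 2)).foldl
          (fun D i => pvSwap D (0 + i) (0 + (A.length - k) - 1 - i)) C := by
    intro C
    apply PySem.List.foldl_congr_mem
    intro acc i hi
    rw [show (0:Nat) + i = i by omega, show 0 + (A.length - k) - 1 - i = A.length - k - i - 1 by omega]
    rfl
  have e3 : ∀ (C : List Int),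
      (List.range (k / 2)).foldl
        (fun C num =>
          (C.set (A.length - 1 - num) (C.getD (A.length - k + num) 0)).set (A.length - k + num)
            (C.getD (A.length - 1 - num) 0)) C
      = (List.range (k / 2)).foldl
          (fun D num => pvSwap D ((A.length - k) + num) ((A.length - k) + k - 1 - num)) C := by
    intro C
    apply PySem.List.foldl_congr_mem
    intro acc num hnum
    rw [List.mem_range] at hnum
    rw [pvSwap_comm _ _ _ (by omega)]
    rw [show (A.length - k) + k - 1 - num = A.length - 1 - num by omega]
    rfl
  rw [e2, e3]
  obtain ⟨C1, hC1, hC1len, g1⟩ :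
      ∃ C1, (List.range (A.length / 2)).foldl
          (fun C i => (C.set i (A.getD (A.length - i - 1) 0)).set (A.length - i - 1) (A.getD i 0))
          (A.map (fun a => a)) = C1 ∧ C1.length = A.length ∧
        ∀ j, C1.getD j 0 =
          if j < A.length / 2 ∨ (A.length - A.length / 2 ≤ j ∧ j < A.length) then
            A.getD (A.length - 1 - j) 0
          else A.getD j 0 :=
    ⟨_, rfl, by rw [setFold_length, List.length_map],
      fun j => loop1_getD A (A.length / 2) j (le_refl _)⟩
  rw [hC1]
  obtain ⟨C2, hC2, hC2len, g2⟩ :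
      ∃ C2, (List.range ((A.length - k) / 2)).foldl
          (fun D i => pvSwap D (0 + i) (0 + (A.length - k) - 1 - i)) C1 = C2 ∧
        C2.length = A.length ∧
        ∀ j, C2.getD j 0 =
          if (0 ≤ j ∧ j < 0 + (A.length - k) / 2) ∨
              (0 + (A.length - k) - (A.length - k) / 2 ≤ j ∧ j < 0 + (A.length - k)) then
            C1.getD (2 * 0 + (A.length - k) - 1 - j) 0
          else C1.getD j 0 :=
    ⟨_, rfl, by rw [swapFold_length, hC1len],
      fun j => swapFold_getD C1 0 (A.length - k) ((A.length - k) / 2) (by omega) (le_refl _) j⟩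
  rw [hC2]
  apply ext_getD
  · rw [swapFold_length, hC2len]
    simp [Nat.le_of_lt hk]
  · intro j hj1
    rw [swapFold_length, hC2len] at hj1
    rw [rot_getD _ _ _ (Nat.le_of_lt hk) hj1]
    rw [swapFold_getD C2 (A.length - k) k (k / 2) (by omega) (le_refl _) j]
    simp only [g2, g1]
    split_ifs <;> first | rfl | omega | (congr 1; omega)

-- ===== VERDICT (by name: the statement is the Claim_ definition above) =====
theorem solve_spec : Claim_equal_solve := by
  intro A B hdom hpre
  unfold Spec_solve
  rcases hpre with hA | hB
  · have hn : 0 < A.length := List.length_pos_iff.mpr hA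
    have h0 : (0 : Int) < (A.length : Int) := by exact_mod_cast hn
    simp only [solve, solve_alt]
    rw [PySem.List.foldl_append_singleton_eq_map, PySem.List.foldl_append_singleton_eq_map]
    simp only [List.nil_append]
    apply List.ext_getElem
    · simp
    · intro i h1 h2
      simp only [List.length_map, List.length_range] at h1
      simp only [List.getElem_map, List.getElem_range]
      rw [List.getD_eq_getElem _ _ h1]
      have hnn := PySem.Int.mod_nonneg (B[i]) h0
      have hlt := PySem.Int.mod_lt (B[i]) h0
      exact query_eq A (PySem.Int.mod (B[i]) (A.length : Int)).toNat (by omega)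
  · subst hB
    simp [solve, solve_alt]
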